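-- pv_equiv track=rewrite | github.com/liskos/isakovich2023 | ege05/240.py | f
-- ===== SOURCE A (Python) =====
-- def f(n):
--     t = ''
--     for i in str(n):
--         s = bin(int(i))[2:]
--         s = s.zfill(4)
--         t = t + s
--     t = t.replace('1', '2').replace('0', '1').replace('2', '0')
--     return int(t, 2)
-- ===== SOURCE B (Python) =====
-- def f(n):
--     r = 0
--     for c in str(n):
--         r = r * 16 + (15 - int(c))
--     return r
-- ===== Notes on version B (the rewrite author's own statement) =====
-- stated objective: simpler
-- what changed: Replaces per-digit binary-string construction (bin, zfill, three replace passes, parsing the bit string) by a single arithmetic pass: inverting the four bits of a decimal digit d is fifteen-minus-d, and concatenating the four-bit blocks is base-sixteen accumulation.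
import Mathlib
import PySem

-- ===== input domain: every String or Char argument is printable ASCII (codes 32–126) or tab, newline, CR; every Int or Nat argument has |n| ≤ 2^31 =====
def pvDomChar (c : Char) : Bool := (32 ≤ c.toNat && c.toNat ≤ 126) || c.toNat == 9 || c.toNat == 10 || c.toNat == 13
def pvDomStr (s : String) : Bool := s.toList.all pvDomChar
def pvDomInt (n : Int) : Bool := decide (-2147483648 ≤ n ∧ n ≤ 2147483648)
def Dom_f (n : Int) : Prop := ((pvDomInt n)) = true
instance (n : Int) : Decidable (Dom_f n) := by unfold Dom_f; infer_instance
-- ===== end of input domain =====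

-- B replaces A's per-digit binary-string building (bin/zfill/replace/int(_,2)) by one arithmetic
-- pass accumulating fifteen-minus-digit in base sixteen; both Pythons raise on negative n (excluded by Pre_f).

-- ===== PORT A =====
-- hand port of Python's int(s, 2): exact on non-empty strings of '0'/'1' characters, which are the
-- only values the parsed string t takes in f (t is a concatenation of flipped zfilled bin() blocks);
-- none = ValueError (as int(s, 2) raises on the empty string / non-binary characters).
def pyIntBase2 (cs : List Char) : Option Int :=
  if cs = [] ∨ ¬ (cs.all (fun c => c = '0' ∨ c = '1')) then none
  else some (cs.foldl (fun a c => 2 * a + (if c = '1' then 1 else 0)) 0)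

def f (n : Int) : Int :=
  -- t = ''; for i in str(n): s = bin(int(i))[2:]; s = s.zfill(4); t = t + s
  -- (the loop threads Option: none = the ValueError int(i) raises on a non-digit character)
  let t0 : Option (List Char) :=
    (PySem.Int.toChars n).foldl
      (fun acc i =>
        acc.bind (fun t =>
          match PySem.Int.ofChars? [i] with
          | none => none
          | some v => some (t ++ PySem.Chars.zfill (PySem.List.slice (PySem.Int.toBinChars0b v) (some 2) none) 4)))
      (some [])
  match t0 with
  | none => 0      -- unreachable under Pre_f (the Python raises)
  | some t =>
    -- t = t.replace('1', '2').replace('0', '1').replace('2', '0')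
    let t := PySem.Chars.replace (PySem.Chars.replace (PySem.Chars.replace t ['1'] ['2']) ['0'] ['1']) ['2'] ['0']
    -- return int(t, 2)
    (pyIntBase2 t).getD 0      -- getD: int(t, 2) never raises on the t reached under Pre_f

-- ===== PORT B =====
def f_alt (n : Int) : Int :=
  -- r = 0; for c in str(n): r = r*16 + (15 - int(c)); return r
  (((PySem.Int.toChars n).foldl
      (fun acc c =>
        acc.bind (fun r => (PySem.Int.ofChars? [c]).map (fun d => r * 16 + (15 - d))))
      (some 0))).getD 0

-- ===== PRECONDITION & SPEC =====
-- Pre_f excludes n < 0, on which the Python A raises ValueError (int('-') on the sign character).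
def Pre_f (n : Int) : Prop := 0 ≤ n
instance (n : Int) : Decidable (Pre_f n) := by unfold Pre_f; infer_instance
def pvWitness_f : Int := (240)

def Spec_f (n : Int) (out : Int) : Prop := out = f_alt n
instance (n : Int) (out : Int) : Decidable (Spec_f n out) := by unfold Spec_f; infer_instance

-- ===== CLAIM (what is proved, stated in full; the proofs are below) =====
def Claim_equal_f : Prop := ∀ (n : Int), Dom_f n → Pre_f n → Spec_f n (f n)

-- ===== LEMMAS AND PROOFS =====

-- the decimal digits of m, most significant first (['0'] for 0)
def digs (m : Nat) : List Nat := if m = 0 then [0] else (Nat.digits 10 m).reverse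

lemma toDigitsCore_eq (fuel : Nat) : ∀ (m : Nat) (ds : List Char), m < fuel →
    Nat.toDigitsCore 10 fuel m ds = (digs m).map Nat.digitChar ++ ds := by
  induction fuel with
  | zero => intro m ds h; omega
  | succ fuel ih =>
    intro m ds h
    rw [Nat.toDigitsCore]
    by_cases h10 : m < 10
    · have hq0 : m / 10 = 0 := by omega
      simp only [hq0, reduceIte]
      rcases Nat.eq_zero_or_pos m with hm | hm
      · subst hm; simp [digs]
      · have hm' : m ≠ 0 := by omega
        have hdig : Nat.digits 10 m = [m] := by
          rw [Nat.digits_def' (by omega : 1 < 10) hm]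
          simp [Nat.div_eq_of_lt h10, Nat.mod_eq_of_lt h10]
        simp [digs, hm', hdig, Nat.mod_eq_of_lt h10]
    · have hm : 0 < m := by omega
      have hm' : m ≠ 0 := by omega
      have hq : 0 < m / 10 := Nat.div_pos (by omega) (by omega)
      have hq' : ¬ (m / 10 = 0) := by omega
      simp only [hq', if_neg, not_false_iff]
      rw [ih (m / 10) _ (by
        have : m / 10 < m := Nat.div_lt_self hm (by omega)
        omega)]
      have hd : Nat.digits 10 m = m % 10 :: Nat.digits 10 (m / 10) :=
        Nat.digits_def' (by omega : 1 < 10) hm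
      simp [digs, hm', hq', hd]

lemma toChars_eq (n : Int) (hn : 0 ≤ n) :
    PySem.Int.toChars n = (digs n.toNat).map Nat.digitChar := by
  have : ¬ n < 0 := by omega
  rw [PySem.Int.toChars]
  simp only [this, if_neg, not_false_iff]
  rw [Nat.toDigits, toDigitsCore_eq (n.toNat + 1) n.toNat [] (by omega)]
  simp

lemma digs_ne_nil (m : Nat) : digs m ≠ [] := by
  rcases Nat.eq_zero_or_pos m with h | h
  · subst h; simp [digs]
  · have hm' : m ≠ 0 := by omega
    simp [digs, hm', Nat.digits_ne_nil_iff_ne_zero.mpr hm']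

lemma digs_lt (m : Nat) : ∀ d ∈ digs m, d < 10 := by
  intro d hd
  rcases Nat.eq_zero_or_pos m with h | h
  · subst h; simp [digs] at hd; omega
  · have hm' : m ≠ 0 := by omega
    simp only [digs, hm', if_neg, not_false_iff, List.mem_reverse] at hd
    exact Nat.digits_lt_base (by omega) hd

-- the 4-character block A appends for digit d: zfill(bin(d)[2:], 4)
def blk (d : Nat) : List Char :=
  PySem.Chars.zfill (PySem.List.slice (PySem.Int.toBinChars0b (d : Int)) (some 2) none) 4

-- the flip '1'→'2', '0'→'1', '2'→'0' composed, as one character map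
def flip3 (c : Char) : Char :=
  let c := if c = '1' then '2' else c
  let c := if c = '0' then '1' else c
  if c = '2' then '0' else c

lemma single_digit_parse (d : Nat) (hd : d < 10) :
    PySem.Int.ofChars? [Nat.digitChar d] = some (d : Int) := by
  interval_cases d <;> decide

-- A's building loop over a digit string produces the concatenation of the blocks
lemma foldA (xs : List Nat) (h : ∀ d ∈ xs, d < 10) : ∀ (t : List Char),
    (xs.map Nat.digitChar).foldl
      (fun acc i =>
        acc.bind (fun t =>
          match PySem.Int.ofChars? [i] with
          | none => none
          | some v => some (t ++ PySem.Chars.zfill (PySem.List.slice (PySem.Int.toBinChars0b v) (some 2) none) 4)))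
      (some t) = some (t ++ xs.flatMap blk) := by
  induction xs with
  | nil => intro t; simp
  | cons d xs ih =>
    intro t
    have hd : d < 10 := h d (by simp)
    simp only [List.map_cons, List.foldl_cons, Option.bind_some, single_digit_parse d hd]
    rw [ih (fun e he => h e (by simp [he])) (t ++ PySem.Chars.zfill (PySem.List.slice (PySem.Int.toBinChars0b (d : Int)) (some 2) none) 4)]
    simp [blk]

-- single-character replace is a character map
lemma replace_go_single (o w : Char) (fuel : Nat) : ∀ (l acc : List Char), l.length ≤ fuel →
    PySem.Chars.replace.go [o] [w] fuel l acc =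
      acc.reverse ++ l.map (fun c => if c = o then w else c) := by
  induction fuel with
  | zero =>
    intro l acc h
    have : l = [] := by cases l <;> simp_all
    subst this; simp [PySem.Chars.replace.go]
  | succ fuel ih =>
    intro l acc h
    cases l with
    | nil => simp [PySem.Chars.replace.go]
    | cons c t =>
      have ht : t.length ≤ fuel := by simp at h; omega
      rw [PySem.Chars.replace.go]
      by_cases hc : c = o
      · have hp : List.isPrefixOf [o] (c :: t) = true := by
          simp [List.isPrefixOf, hc]
        simp only [hp, reduceIte]
        rw [ih _ _ (by simpa using ht)]
        simp [hc]
      · have hp : List.isPrefixOf [o] (c :: t) = false := by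
          simp [List.isPrefixOf]; exact fun hh => hc hh.symm
        simp only [hp, Bool.false_eq_true, if_neg, not_false_iff]
        rw [ih _ _ ht]
        simp [hc]

lemma replace_single (s : List Char) (o w : Char) :
    PySem.Chars.replace s [o] [w] = s.map (fun c => if c = o then w else c) := by
  rw [PySem.Chars.replace]
  simp only [List.isEmpty_cons, Bool.false_eq_true, if_neg, not_false_iff]
  rw [replace_go_single o w s.length s [] (le_refl _)]
  simp

lemma replace3 (t : List Char) :
    PySem.Chars.replace (PySem.Chars.replace (PySem.Chars.replace t ['1'] ['2']) ['0'] ['1']) ['2'] ['0']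
      = t.map flip3 := by
  simp only [replace_single, List.map_map]
  apply List.map_congr_left
  intro c _
  simp [Function.comp, flip3]

-- per digit: B's accumulator step equals parsing the flipped block in base 2
lemma block_fold (d : Nat) (hd : d < 10) (a : Int) :
    ((blk d).map flip3).foldl (fun a c => 2 * a + (if c = '1' then 1 else 0)) a
      = a * 16 + (15 - (d : Int)) := by
  interval_cases d
  · rw [(by decide : (blk 0).map flip3 = ['1','1','1','1'])]; simp [List.foldl]; ring
  · rw [(by decide : (blk 1).map flip3 = ['1','1','1','0'])]; simp [List.foldl]; ring
  · rw [(by decide : (blk 2).map flip3 = ['1','1','0','1'])]; simp [List.foldl]; ring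
  · rw [(by decide : (blk 3).map flip3 = ['1','1','0','0'])]; simp [List.foldl]; ring
  · rw [(by decide : (blk 4).map flip3 = ['1','0','1','1'])]; simp [List.foldl]; ring
  · rw [(by decide : (blk 5).map flip3 = ['1','0','1','0'])]; simp [List.foldl]; ring
  · rw [(by decide : (blk 6).map flip3 = ['1','0','0','1'])]; simp [List.foldl]; ring
  · rw [(by decide : (blk 7).map flip3 = ['1','0','0','0'])]; simp [List.foldl]; ring
  · rw [(by decide : (blk 8).map flip3 = ['0','1','1','1'])]; simp [List.foldl]; ring
  · rw [(by decide : (blk 9).map flip3 = ['0','1','1','0'])]; simp [List.foldl]; ring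

lemma block_bits (d : Nat) (hd : d < 10) :
    ((blk d).map flip3).all (fun c => c = '0' ∨ c = '1') = true ∧ ((blk d).map flip3) ≠ [] := by
  interval_cases d <;> exact ⟨by decide, by decide⟩

-- the final parse of the concatenated flipped blocks is B's fold
lemma parse_blocks (xs : List Nat) (hne : xs ≠ []) (h : ∀ d ∈ xs, d < 10) :
    pyIntBase2 ((xs.flatMap blk).map flip3)
      = some (xs.foldl (fun (a : Int) (d : Nat) => a * 16 + (15 - (d : Int))) 0) := by
  have hall : ∀ c ∈ (xs.flatMap blk).map flip3, c = '0' ∨ c = '1' := by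
    intro c hc
    rcases List.mem_map.mp hc with ⟨x, hx, rfl⟩
    rcases List.mem_flatMap.mp hx with ⟨d, hd, hxd⟩
    have hb := (block_bits d (h d hd)).1
    rw [List.all_eq_true] at hb
    have := hb (flip3 x) (List.mem_map_of_mem hxd)
    simpa using this
  have hnonempty : (xs.flatMap blk).map flip3 ≠ [] := by
    cases xs with
    | nil => exact absurd rfl hne
    | cons d xs =>
      simp only [List.flatMap_cons, List.map_append]
      intro hcontra
      have := (block_bits d (h d (by simp))).2
      rw [List.append_eq_nil_iff] at hcontra
      exact this hcontra.1
  rw [pyIntBase2]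
  have hb : ((xs.flatMap blk).map flip3).all (fun c => decide (c = '0' ∨ c = '1')) = true := by
    rw [List.all_eq_true]
    intro c hc
    exact decide_eq_true (hall c hc)
  rw [if_neg (by
    rintro (hc | hc)
    · exact hnonempty hc
    · exact hc hb)]
  congr 1
  rw [List.map_flatMap]
  have key : ∀ (ys : List Nat), (∀ d ∈ ys, d < 10) → ∀ (a : Int),
      (ys.flatMap (fun d => (blk d).map flip3)).foldl
          (fun a c => 2 * a + (if c = '1' then 1 else 0)) a
        = ys.foldl (fun (a : Int) (d : Nat) => a * 16 + (15 - (d : Int))) a := by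
    intro ys
    induction ys with
    | nil => intro _ a; simp
    | cons d ys ih =>
      intro hys a
      simp only [List.flatMap_cons, List.foldl_append, List.foldl_cons]
      rw [block_fold d (hys d (by simp)) a, ih (fun e he => hys e (by simp [he]))]
  exact key xs h 0

-- B's loop over a digit string is the arithmetic fold
lemma foldB (xs : List Nat) (h : ∀ d ∈ xs, d < 10) : ∀ (r : Int),
    (xs.map Nat.digitChar).foldl
      (fun acc c =>
        acc.bind (fun r => (PySem.Int.ofChars? [c]).map (fun d => r * 16 + (15 - d))))
      (some r) = some (xs.foldl (fun (a : Int) (d : Nat) => a * 16 + (15 - (d : Int))) r) := by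
  induction xs with
  | nil => intro r; simp
  | cons d xs ih =>
    intro r
    simp only [List.map_cons, List.foldl_cons, Option.bind_some,
      single_digit_parse d (h d (by simp)), Option.map_some]
    exact ih (fun e he => h e (by simp [he])) _

-- ===== VERDICT (by name: the statement is the Claim_ definition above) =====
theorem f_spec : Claim_equal_f := by
  intro n _ hpre
  unfold Spec_f f f_alt
  rw [toChars_eq n hpre]
  rw [foldA (digs n.toNat) (digs_lt n.toNat) []]
  rw [foldB (digs n.toNat) (digs_lt n.toNat) 0]
  simp only [List.nil_append]
  rw [replace3, parse_blocks (digs n.toNat) (digs_ne_nil n.toNat) (digs_lt n.toNat)]
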